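-- pv_equiv track=rewrite | github.com/pfrimpong11/tech_chat | original.py | calculate_total_aggregate
-- ===== SOURCE A (Python) =====
-- def calculate_total_aggregate(compulsory_data, optional_data):
--     def validate_and_convert_grade(grade):
--         try:
--             grade = int(grade)
--             if grade < 1:
--                 raise ValueError("Grade must be a positive integer")
--             return min(grade, 4)
--         except (ValueError, TypeError):
--             return 4
--
--     compulsory_grades = [validate_and_convert_grade(grade) for grade in list(compulsory_data.values())[:4]]
--     optional_grades = [validate_and_convert_grade(grade) for grade in list(optional_data.values())[:4]]
--
--     compulsory_grades.sort()
--     optional_grades.sort()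
--
--     compulsory_sum = sum(compulsory_grades[:3])
--     optional_sum = sum(optional_grades[:3])
--
--     total_aggregate = compulsory_sum + optional_sum
--     return total_aggregate
-- ===== SOURCE B (Python) =====
-- def calculate_total_aggregate(compulsory_data, optional_data):
--     def validate_and_convert_grade(grade):
--         try:
--             grade = int(grade)
--             if grade < 1:
--                 raise ValueError("Grade must be a positive integer")
--             return min(grade, 4)
--         except (ValueError, TypeError):
--             return 4
--
--     def partial_sum(data):
--         g = [validate_and_convert_grade(v) for v in list(data.values())[:4]]
--         return sum(g) - max(g) if len(g) > 3 else sum(g)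
--
--     return partial_sum(compulsory_data) + partial_sum(optional_data)
-- ===== Notes on version B (the rewrite author's own statement) =====
-- stated objective: alternative
-- what changed: Replaces sort-then-sum-of-first-3 with a single max scan: since each grade list has at most 4 entries, the sum of the three smallest is the total minus the maximum when there are 4 entries, else the plain total; no sorting.
import Mathlib
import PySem

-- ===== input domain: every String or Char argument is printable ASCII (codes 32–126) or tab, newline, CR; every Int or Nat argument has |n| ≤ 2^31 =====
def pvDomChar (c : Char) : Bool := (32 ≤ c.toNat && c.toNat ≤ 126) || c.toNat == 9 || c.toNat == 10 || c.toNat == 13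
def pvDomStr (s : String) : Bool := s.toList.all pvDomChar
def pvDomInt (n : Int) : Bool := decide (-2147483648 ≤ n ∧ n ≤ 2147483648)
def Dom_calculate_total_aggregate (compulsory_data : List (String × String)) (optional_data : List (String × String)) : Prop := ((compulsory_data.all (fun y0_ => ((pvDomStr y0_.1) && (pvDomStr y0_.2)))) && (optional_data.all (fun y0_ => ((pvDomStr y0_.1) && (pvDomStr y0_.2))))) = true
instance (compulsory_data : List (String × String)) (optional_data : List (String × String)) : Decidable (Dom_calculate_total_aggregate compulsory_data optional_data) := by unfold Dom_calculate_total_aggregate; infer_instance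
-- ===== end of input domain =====

-- B replaces the sort-then-take-3 step by a single max scan (sum minus max when 4 grades, else plain sum): an alternative of the same cost.


-- ===== PORT A =====
-- both Pythons define the same inner helper validate_and_convert_grade; int(grade) → PySem.Int.ofStr? (none = ValueError → except branch → 4)
def validate_and_convert_grade (grade : String) : Int :=
  match PySem.Int.ofStr? grade with
  | none => 4
  | some n => if n < 1 then 4 else min n 4

def calculate_total_aggregate (compulsory_data : List (String × String)) (optional_data : List (String × String)) : Int :=
  let compulsory_grades := ((compulsory_data.map Prod.snd).take 4).map validate_and_convert_grade
  let optional_grades := ((optional_data.map Prod.snd).take 4).map validate_and_convert_grade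
  let compulsory_sorted := PySem.List.sorted compulsory_grades id
  let optional_sorted := PySem.List.sorted optional_grades id
  let compulsory_sum := (compulsory_sorted.take 3).sum
  let optional_sum := (optional_sorted.take 3).sum
  compulsory_sum + optional_sum

-- ===== PORT B =====
-- max(g) is only evaluated under len(g) > 3, so g is nonempty there; .getD 0 is never the result of an empty max
def partial_sum (data : List (String × String)) : Int :=
  let g := ((data.map Prod.snd).take 4).map validate_and_convert_grade
  if 3 < g.length then g.sum - (PySem.List.max? g id).getD 0 else g.sum

def calculate_total_aggregate_alt (compulsory_data : List (String × String)) (optional_data : List (String × String)) : Int :=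
  partial_sum compulsory_data + partial_sum optional_data

-- ===== PRECONDITION & SPEC =====
def Spec_calculate_total_aggregate (compulsory_data : List (String × String)) (optional_data : List (String × String)) (out : Int) : Prop := out = calculate_total_aggregate_alt compulsory_data optional_data
instance (compulsory_data : List (String × String)) (optional_data : List (String × String)) (out : Int) : Decidable (Spec_calculate_total_aggregate compulsory_data optional_data out) := by unfold Spec_calculate_total_aggregate; infer_instance

-- ===== CLAIM (what is proved, stated in full; the proofs are below) =====
def Claim_equal_calculate_total_aggregate : Prop := ∀ (compulsory_data : List (String × String)) (optional_data : List (String × String)), Dom_calculate_total_aggregate compulsory_data optional_data → Spec_calculate_total_aggregate compulsory_data optional_data (calculate_total_aggregate compulsory_data optional_data)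

-- ===== LEMMAS AND PROOFS =====

-- the heart of the equivalence: for a list of at most 4 items, the sum of the three
-- smallest (sort, take 3) equals total minus max when there are 4 items, else the total
lemma sum_take3_sorted_eq (g : List Int) (h : g.length ≤ 4) :
    ((PySem.List.sorted g id).take 3).sum =
      if 3 < g.length then g.sum - (PySem.List.max? g id).getD 0 else g.sum := by
  have hperm := PySem.List.sorted_perm g (id : Int → Int) false
  by_cases h3 : 3 < g.length
  · have hl : g.length = 4 := by omega
    have hne : g ≠ [] := by intro e; simp [e] at hl
    obtain ⟨m, hm⟩ : ∃ m, PySem.List.max? g (id : Int → Int) = some m := by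
      cases hmax : PySem.List.max? g (id : Int → Int) with
      | none => exact absurd ((PySem.List.max?_eq_none_iff g id).mp hmax) hne
      | some m => exact ⟨m, rfl⟩
    have hsl : (PySem.List.sorted g (id : Int → Int)).length = 4 := by
      rw [PySem.List.length_sorted, hl]
    have hpw := PySem.List.sorted_pairwise g (id : Int → Int)
    obtain ⟨a, b, c, d, hse⟩ : ∃ a b c d, PySem.List.sorted g (id : Int → Int) = [a, b, c, d] := by
      match hh : PySem.List.sorted g (id : Int → Int), hsl with
      | [a, b, c, d], _ => exact ⟨a, b, c, d, rfl⟩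
    rw [hse] at hperm hpw
    have hsum : a + (b + (c + d)) = g.sum := by
      have := hperm.sum_eq; simpa using this
    have hmem : m ∈ ([a, b, c, d] : List Int) := hperm.mem_iff.mpr (PySem.List.max?_mem hm)
    have hdg : d ∈ g := hperm.mem_iff.mp (by simp)
    have hdm : d ≤ m := PySem.List.max?_isMax hm d hdg
    have hmd : m ≤ d := by
      simp only [List.pairwise_cons, List.mem_cons, List.not_mem_nil, or_false,
        forall_eq_or_imp, forall_eq, id] at hpw
      simp only [List.mem_cons, List.not_mem_nil, or_false] at hmem
      obtain ⟨⟨hab, hac, had⟩, ⟨hbc, hbd⟩, hcd⟩ := hpw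
      rcases hmem with rfl | rfl | rfl | rfl <;> omega
    rw [hse]
    simp only [if_pos h3, hm, Option.getD_some, List.take, List.sum_cons, List.sum_nil]
    omega
  · have htake : (PySem.List.sorted g (id : Int → Int)).take 3 = PySem.List.sorted g id := by
      apply List.take_of_length_le
      rw [PySem.List.length_sorted]; omega
    rw [htake, if_neg h3, hperm.sum_eq]

theorem calculate_total_aggregate_spec : Claim_equal_calculate_total_aggregate := by
  intro compulsory_data optional_data _
  show _ = _
  unfold calculate_total_aggregate calculate_total_aggregate_alt partial_sum
  simp only []
  rw [sum_take3_sorted_eq, sum_take3_sorted_eq] <;>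
    simp [List.length_take]
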